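-- pv_equiv track=rewrite | github.com/mnckapilan/funny-headlines-nlp | approach_1/preprocessing_experiment.py | hyphen_tokenizer
-- ===== SOURCE A (Python) =====
-- def hyphen_tokenizer(data):
--     tokenized_corpus = []
--     for sentence in data:
--         sentence = sentence.lower()
--         tokenized_sentence = []
--         for token in sentence.split(' '):
--             for tok in token.split('-'):
--                 tokenized_sentence.append(tok)
--         tokenized_corpus.append(tokenized_sentence)
--     vocabulary = []
--     for sentence in tokenized_corpus:
--         for token in sentence:
--             if token not in vocabulary:
--                 if True:
--                     vocabulary.append(token)
--     return vocabulary, tokenized_corpus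
-- ===== SOURCE B (Python) =====
-- def _tokens(sentence):
--     tokens = []
--     cur = []
--     for ch in sentence:
--         if ch == ' ' or ch == '-':
--             tokens.append(''.join(cur))
--             cur = []
--         else:
--             cur.append(ch)
--     tokens.append(''.join(cur))
--     return tokens
--
--
-- def hyphen_tokenizer(data):
--     vocabulary = []
--     seen = set()
--     tokenized_corpus = []
--     for sentence in data:
--         tokens = _tokens(sentence.lower())
--         tokenized_corpus.append(tokens)
--         for tok in tokens:
--             if tok not in seen:
--                 seen.add(tok)
--                 vocabulary.append(tok)
--     return vocabulary, tokenized_corpus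
-- ===== Notes on version B (the rewrite author's own statement) =====
-- stated objective: faster
-- what changed: One fused pass: each sentence is tokenized by a single character scan that flushes on ' ' or '-' (instead of A's nested space-then-hyphen split loops), and the vocabulary is collected in the same loop with a seen-set membership test instead of A's separate second pass that scans the vocabulary list for every token.
import Mathlib
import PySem

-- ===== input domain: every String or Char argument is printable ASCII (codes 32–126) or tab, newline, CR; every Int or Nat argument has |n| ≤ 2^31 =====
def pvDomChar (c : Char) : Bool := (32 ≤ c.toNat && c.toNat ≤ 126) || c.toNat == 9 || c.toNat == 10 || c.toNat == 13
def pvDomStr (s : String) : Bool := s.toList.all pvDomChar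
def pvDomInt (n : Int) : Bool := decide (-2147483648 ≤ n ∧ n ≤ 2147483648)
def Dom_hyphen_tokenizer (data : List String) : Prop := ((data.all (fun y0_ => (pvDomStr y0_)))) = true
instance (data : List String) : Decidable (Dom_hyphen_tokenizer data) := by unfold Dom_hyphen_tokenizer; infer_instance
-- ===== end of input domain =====

-- B fuses A's two passes into one loop per sentence (single char-scan tokenization on ' '/'-'
-- instead of nested space-then-hyphen splits, and a seen-set instead of A's linear vocabulary scan).

-- ===== PORT A =====
def hyphen_tokenizer (data : List String) : List String × List (List String) :=
  let tokenized_corpus := data.foldl (fun acc sentence =>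
    let s := PySem.Chars.lower sentence.toList
    let tokenized_sentence := (PySem.Chars.splitOn s [' ']).foldl (fun ts token =>
      (PySem.Chars.splitOn token ['-']).foldl (fun ts tok => ts ++ [String.ofList tok]) ts) []
    acc ++ [tokenized_sentence]) []
  let vocabulary := tokenized_corpus.foldl (fun voc sentence =>
    sentence.foldl (fun voc token => if voc.contains token then voc else voc ++ [token]) voc) []
  (vocabulary, tokenized_corpus)

-- ===== PORT B =====
-- per-sentence single char scan: flush the current token at ' ' or '-'
def pvTokens (s : List Char) : List String :=
  let st := s.foldl (fun (st : List String × List Char) ch =>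
    if ch == ' ' || ch == '-' then (st.1 ++ [String.ofList st.2], [])
    else (st.1, st.2 ++ [ch])) ([], [])
  st.1 ++ [String.ofList st.2]

def hyphen_tokenizer_alt (data : List String) : List String × List (List String) :=
  let st := data.foldl (fun (st : List String × PySem.Set String × List (List String)) sentence =>
    let tokens := pvTokens (PySem.Chars.lower sentence.toList)
    let corpus := st.2.2 ++ [tokens]
    let vs := tokens.foldl (fun (vs : List String × PySem.Set String) tok =>
      if PySem.Set.contains vs.2 tok then vs else (vs.1 ++ [tok], PySem.Set.add vs.2 tok))
      (st.1, st.2.1)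
    (vs.1, vs.2, corpus)) ([], PySem.Set.empty, [])
  (st.1, st.2.2)

-- ===== PRECONDITION & SPEC =====
def Spec_hyphen_tokenizer (data : List String) (out : List String × List (List String)) : Prop := out = hyphen_tokenizer_alt data
instance (data : List String) (out : List String × List (List String)) : Decidable (Spec_hyphen_tokenizer data out) := by unfold Spec_hyphen_tokenizer; infer_instance

-- ===== CLAIM (what is proved, stated in full; the proofs are below) =====
def Claim_equal_hyphen_tokenizer : Prop := ∀ (data : List String), Dom_hyphen_tokenizer data → Spec_hyphen_tokenizer data (hyphen_tokenizer data)

-- ===== LEMMAS AND PROOFS =====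

-- reference split of a char list at every char satisfying p
def splitP (p : Char → Bool) : List Char → List (List Char)
  | [] => [[]]
  | x :: xs =>
    if p x then [] :: splitP p xs
    else match splitP p xs with
      | [] => [[x]]
      | t :: ts => (x :: t) :: ts

theorem splitP_ne_nil (p : Char → Bool) (cs : List Char) : splitP p cs ≠ [] := by
  cases cs with
  | nil => simp [splitP]
  | cons x xs =>
    simp only [splitP]
    split
    · simp
    · split <;> simp

def consHead (pfx : List Char) : List (List Char) → List (List Char)
  | [] => [pfx]
  | t :: ts => (pfx ++ t) :: ts

theorem consHead_nil (l : List (List Char)) (h : l ≠ []) : consHead [] l = l := by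
  cases l with
  | nil => exact absurd rfl h
  | cons t ts => simp [consHead]

theorem go_eq (c : Char) : ∀ fuel (l : List Char), l.length < fuel → ∀ cur acc,
    PySem.Chars.splitOn.go [c] fuel l cur acc
      = acc.reverse ++ consHead cur.reverse (splitP (fun x => x == c) l) := by
  intro fuel
  induction fuel with
  | zero => intro l h; omega
  | succ n ih =>
    intro l h cur acc
    cases l with
    | nil => simp [PySem.Chars.splitOn.go, splitP, consHead]
    | cons x rest =>
      rw [PySem.Chars.splitOn.go]
      simp only [List.length_cons] at h
      by_cases hx : x = c
      · subst hx
        have hp : [x].isPrefixOf (x :: rest) = true := by simp [List.isPrefixOf]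
        rw [if_pos hp]
        simp only [List.length_cons, List.length_nil, List.drop_succ_cons, List.drop_zero]
        rw [ih rest (by omega) [] (cur.reverse :: acc)]
        simp only [splitP, beq_self_eq_true, if_pos]
        simp only [List.reverse_nil]
        rw [consHead_nil _ (splitP_ne_nil _ _)]
        simp [consHead]
      · have hp : [c].isPrefixOf (x :: rest) = false := by
          simp [List.isPrefixOf]; exact fun hxc => hx hxc.symm
        rw [if_neg (by simp [hp])]
        rw [ih rest (by omega) (x :: cur) acc]
        simp only [splitP]
        rw [if_neg (by simp [hx])]
        rcases hsp : splitP (fun y => y == c) rest with _ | ⟨t, ts⟩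
        · exact absurd hsp (splitP_ne_nil _ _)
        · simp [consHead]

theorem splitOn_eq_splitP (c : Char) (cs : List Char) :
    PySem.Chars.splitOn cs [c] = splitP (fun x => x == c) cs := by
  rw [PySem.Chars.splitOn, go_eq c _ cs (by omega) [] []]
  simp [consHead_nil _ (splitP_ne_nil _ _)]

theorem splitP_union (cs : List Char) :
    splitP (fun x => x == ' ' || x == '-') cs
      = (splitP (fun x => x == ' ') cs).flatMap (splitP (fun x => x == '-')) := by
  induction cs with
  | nil => simp [splitP]
  | cons x xs ih =>
    by_cases hs : x = ' '
    · subst hs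
      simp [splitP, ih]
    · by_cases hh : x = '-'
      · subst hh
        simp only [splitP, ih]
        rw [if_pos (by simp), if_neg (by simp)]
        rcases hsp : splitP (fun y => y == ' ') xs with _ | ⟨t, ts⟩
        · exact absurd hsp (splitP_ne_nil _ _)
        · simp only [List.flatMap_cons, splitP]
          rw [if_pos (by simp)]
          simp
      · simp only [splitP]
        rw [if_neg (by simp [hs, hh]), if_neg (by simp [hs])]
        rcases hsp : splitP (fun y => y == ' ') xs with _ | ⟨t, ts⟩
        · exact absurd hsp (splitP_ne_nil _ _)
        · simp only [List.flatMap_cons, splitP]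
          rw [if_neg (by simp [hh])]
          rcases hsp2 : splitP (fun y => y == '-') t with _ | ⟨u, us⟩
          · exact absurd hsp2 (splitP_ne_nil _ _)
          · simp [hsp, hsp2, ih]

theorem foldl_push {α β : Type} (f : α → β) :
    ∀ (l : List α) (ts : List β), l.foldl (fun ts x => ts ++ [f x]) ts = ts ++ l.map f := by
  intro l
  induction l with
  | nil => simp
  | cons x xs ih => intro ts; simp [ih]

theorem foldl_flat {α β : Type} (g : α → List β) :
    ∀ (l : List α) (ts : List β), l.foldl (fun ts x => ts ++ g x) ts = ts ++ l.flatMap g := by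
  intro l
  induction l with
  | nil => simp
  | cons x xs ih => intro ts; simp [ih]

-- A's nested split-loops compute the map of the two-char split
theorem tokensA_eq (cs : List Char) :
    (PySem.Chars.splitOn cs [' ']).foldl (fun ts token =>
        (PySem.Chars.splitOn token ['-']).foldl (fun ts tok => ts ++ [String.ofList tok]) ts) []
      = (splitP (fun x => x == ' ' || x == '-') cs).map String.ofList := by
  have h1 : ∀ (ts : List String) (token : List Char),
      (PySem.Chars.splitOn token ['-']).foldl (fun ts tok => ts ++ [String.ofList tok]) ts
        = ts ++ (splitP (fun x => x == '-') token).map String.ofList := by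
    intro ts token
    rw [splitOn_eq_splitP, foldl_push]
  calc (PySem.Chars.splitOn cs [' ']).foldl (fun ts token =>
        (PySem.Chars.splitOn token ['-']).foldl (fun ts tok => ts ++ [String.ofList tok]) ts) []
      = (PySem.Chars.splitOn cs [' ']).foldl
          (fun ts token => ts ++ (splitP (fun x => x == '-') token).map String.ofList) [] := by
        exact PySem.List.foldl_congr_mem _ _ _ _ (fun ts token _ => h1 ts token)
    _ = (splitP (fun x => x == ' ' || x == '-') cs).map String.ofList := by
        rw [splitOn_eq_splitP, foldl_flat, splitP_union, List.nil_append, List.map_flatMap]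

-- B's char scan computes the same map
theorem pvTokens_fold (cs : List Char) : ∀ (ts : List String) (cur : List Char),
    (cs.foldl (fun (st : List String × List Char) ch =>
        if ch == ' ' || ch == '-' then (st.1 ++ [String.ofList st.2], [])
        else (st.1, st.2 ++ [ch])) (ts, cur)).1
      ++ [String.ofList (cs.foldl (fun (st : List String × List Char) ch =>
        if ch == ' ' || ch == '-' then (st.1 ++ [String.ofList st.2], [])
        else (st.1, st.2 ++ [ch])) (ts, cur)).2]
      = ts ++ (consHead cur (splitP (fun x => x == ' ' || x == '-') cs)).map String.ofList := by
  induction cs with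
  | nil => intro ts cur; simp [splitP, consHead]
  | cons x xs ih =>
    intro ts cur
    by_cases hx : (x == ' ' || x == '-') = true
    · simp only [List.foldl_cons, splitP, hx, if_pos]
      rw [ih]
      rw [consHead_nil _ (splitP_ne_nil _ _)]
      simp [consHead]
    · simp only [List.foldl_cons, splitP, hx]
      rw [ih]
      simp only [Bool.false_eq_true, if_false]
      rcases hsp : splitP (fun y => y == ' ' || y == '-') xs with _ | ⟨t, tl⟩
      · exact absurd hsp (splitP_ne_nil _ _)
      · simp [consHead]

theorem pvTokens_eq (cs : List Char) :
    pvTokens cs = (splitP (fun x => x == ' ' || x == '-') cs).map String.ofList := by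
  unfold pvTokens
  rw [pvTokens_fold cs [] []]
  rw [consHead_nil _ (splitP_ne_nil _ _)]
  simp

theorem tokens_agree (cs : List Char) :
    (PySem.Chars.splitOn cs [' ']).foldl (fun ts token =>
        (PySem.Chars.splitOn token ['-']).foldl (fun ts tok => ts ++ [String.ofList tok]) ts) []
      = pvTokens cs := by
  rw [tokensA_eq, pvTokens_eq]

-- fused vocabulary loop: with seen = vocabulary, B's per-token step is A's
theorem vocab_fuse (tokens : List String) : ∀ (v : List String),
    tokens.foldl (fun (vs : List String × PySem.Set String) tok =>
        if PySem.Set.contains vs.2 tok then vs else (vs.1 ++ [tok], PySem.Set.add vs.2 tok)) (v, v)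
      = (tokens.foldl (fun voc tok => if voc.contains tok then voc else voc ++ [tok]) v,
         tokens.foldl (fun voc tok => if voc.contains tok then voc else voc ++ [tok]) v) := by
  induction tokens with
  | nil => intro v; simp
  | cons t ts ih =>
    intro v
    by_cases hc : v.contains t
    · simp only [List.foldl_cons, PySem.Set.contains, hc, if_pos]
      exact ih v
    · simp only [List.foldl_cons, PySem.Set.contains, hc]
      simp only [Bool.false_eq_true, if_false, PySem.Set.add, PySem.Set.contains, hc]
      exact ih (v ++ [t])

-- the whole of B's single pass, as A's two passes
theorem main_inv (data : List String) : ∀ (v : List String) (c : List (List String)),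
    data.foldl (fun (st : List String × PySem.Set String × List (List String)) sentence =>
        let tokens := pvTokens (PySem.Chars.lower sentence.toList)
        let corpus := st.2.2 ++ [tokens]
        let vs := tokens.foldl (fun (vs : List String × PySem.Set String) tok =>
          if PySem.Set.contains vs.2 tok then vs else (vs.1 ++ [tok], PySem.Set.add vs.2 tok))
          (st.1, st.2.1)
        (vs.1, vs.2, corpus)) (v, v, c)
      = ((data.map (fun s => pvTokens (PySem.Chars.lower s.toList))).foldl
           (fun voc sent => sent.foldl (fun voc tok => if voc.contains tok then voc else voc ++ [tok]) voc) v,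
         (data.map (fun s => pvTokens (PySem.Chars.lower s.toList))).foldl
           (fun voc sent => sent.foldl (fun voc tok => if voc.contains tok then voc else voc ++ [tok]) voc) v,
         c ++ data.map (fun s => pvTokens (PySem.Chars.lower s.toList))) := by
  induction data with
  | nil => intro v c; simp
  | cons s ss ih =>
    intro v c
    simp only [List.foldl_cons, List.map_cons]
    rw [vocab_fuse]
    rw [ih]
    simp

-- ===== VERDICT (by name: the statement is the Claim_ definition above) =====
theorem hyphen_tokenizer_spec : Claim_equal_hyphen_tokenizer := by
  intro data _
  unfold Spec_hyphen_tokenizer hyphen_tokenizer hyphen_tokenizer_alt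
  simp only [PySem.Set.empty]
  rw [main_inv data [] []]
  simp only [List.nil_append]
  have hcorpus : data.foldl (fun acc sentence =>
      acc ++ [(PySem.Chars.splitOn (PySem.Chars.lower sentence.toList) [' ']).foldl (fun ts token =>
        (PySem.Chars.splitOn token ['-']).foldl (fun ts tok => ts ++ [String.ofList tok]) ts) []]) []
      = data.map (fun s => pvTokens (PySem.Chars.lower s.toList)) := by
    rw [foldl_push (fun s => (PySem.Chars.splitOn (PySem.Chars.lower s.toList) [' ']).foldl (fun ts token =>
        (PySem.Chars.splitOn token ['-']).foldl (fun ts tok => ts ++ [String.ofList tok]) ts) []) data []]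
    simp only [List.nil_append]
    exact List.map_congr_left (fun s _ => tokens_agree _)
  rw [hcorpus]
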